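-- pv_equiv track=rewrite | github.com/may-na/cs-102.1 | src/lab4/survey.py | generate_age_groups
-- ===== SOURCE A (Python) =====
-- def generate_age_groups(age_group_input):
--     age_group_values = age_group_input.split()
--     age_groups = []
--     lower_bound = 0
--     for age_group_value in age_group_values:
--         upper_bound = int(age_group_value)
--         age_group = (lower_bound, upper_bound)
--         age_groups.append(age_group)
--         lower_bound = upper_bound + 1
--     age_groups.append((lower_bound, 123))
--     return age_groups
-- ===== SOURCE B (Python) =====
-- def generate_age_groups(age_group_input):
--     vals = [int(t) for t in age_group_input.split()]
--     lowers = [0] + [v + 1 for v in vals]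
--     uppers = vals + [123]
--     return list(zip(lowers, uppers))
-- ===== Notes on version B (the rewrite author's own statement) =====
-- stated objective: simpler
-- what changed: Replaces the threaded lower_bound accumulator loop with building the lower- and upper-bound sequences separately and zipping them.
import Mathlib
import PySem

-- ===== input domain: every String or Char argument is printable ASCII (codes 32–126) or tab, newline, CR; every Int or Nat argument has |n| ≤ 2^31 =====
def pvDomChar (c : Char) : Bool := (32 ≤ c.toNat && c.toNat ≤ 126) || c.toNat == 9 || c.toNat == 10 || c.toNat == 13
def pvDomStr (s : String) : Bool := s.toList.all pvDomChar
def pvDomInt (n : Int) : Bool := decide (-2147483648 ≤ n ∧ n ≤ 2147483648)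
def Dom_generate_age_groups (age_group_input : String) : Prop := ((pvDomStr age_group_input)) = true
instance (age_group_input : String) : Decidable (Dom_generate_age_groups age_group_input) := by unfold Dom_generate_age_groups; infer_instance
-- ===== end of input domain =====

-- B replaces A's threaded lower_bound accumulator with two coordinate lists zipped together (objective: simpler).

-- ===== PORT A =====
-- A's for-loop over the tokens, threading (age_groups, lower_bound); none = int() raised ValueError
def pvALoop : List String → List (Int × Int) → Int → Option (List (Int × Int))
  | [], age_groups, lower_bound => some (age_groups ++ [(lower_bound, 123)])
  | w :: ws, age_groups, lower_bound =>
    match PySem.Int.ofStr? w with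
    | none => none
    | some upper_bound => pvALoop ws (age_groups ++ [(lower_bound, upper_bound)]) (upper_bound + 1)

def generate_age_groups (age_group_input : String) : List (Int × Int) :=
  (pvALoop (PySem.Str.split₀ age_group_input) [] 0).getD []

-- ===== PORT B =====
-- the comprehension [int(t) for t in …]; none = ValueError
def pvParseInts : List String → Option (List Int)
  | [] => some []
  | w :: ws =>
    match PySem.Int.ofStr? w with
    | none => none
    | some v => (pvParseInts ws).map (v :: ·)

def generate_age_groups_alt (age_group_input : String) : List (Int × Int) :=
  match pvParseInts (PySem.Str.split₀ age_group_input) with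
  | none => []
  | some vals => List.zip (0 :: vals.map (· + 1)) (vals ++ [123])

-- ===== PRECONDITION & SPEC =====
-- Pre_ excludes exactly the inputs with a token int() rejects, where A raises ValueError.
def Pre_generate_age_groups (age_group_input : String) : Prop :=
  (PySem.Str.split₀ age_group_input).all (fun w => (PySem.Int.ofStr? w).isSome) = true
instance (age_group_input : String) : Decidable (Pre_generate_age_groups age_group_input) := by unfold Pre_generate_age_groups; infer_instance
def pvWitness_generate_age_groups : String := "18 35 60"

def Spec_generate_age_groups (age_group_input : String) (out : List (Int × Int)) : Prop := out = generate_age_groups_alt age_group_input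
instance (age_group_input : String) (out : List (Int × Int)) : Decidable (Spec_generate_age_groups age_group_input out) := by unfold Spec_generate_age_groups; infer_instance

-- ===== CLAIM (what is proved, stated in full; the proofs are below) =====
def Claim_equal_generate_age_groups : Prop := ∀ (age_group_input : String), Dom_generate_age_groups age_group_input → Pre_generate_age_groups age_group_input → Spec_generate_age_groups age_group_input (generate_age_groups age_group_input)

-- ===== LEMMAS AND PROOFS =====
theorem pvParseInts_isSome (ws : List String)
    (h : ws.all (fun w => (PySem.Int.ofStr? w).isSome) = true) :
    ∃ vals, pvParseInts ws = some vals := by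
  induction ws with
  | nil => exact ⟨[], rfl⟩
  | cons w ws ih =>
    simp only [List.all_cons, Bool.and_eq_true] at h
    obtain ⟨u, hu⟩ := Option.isSome_iff_exists.mp h.1
    obtain ⟨vs, hvs⟩ := ih h.2
    exact ⟨u :: vs, by simp [pvParseInts, hu, hvs]⟩

theorem pvALoop_eq (ws : List String) :
    ∀ (vals : List Int) (acc : List (Int × Int)) (lb : Int),
    pvParseInts ws = some vals →
    pvALoop ws acc lb = some (acc ++ List.zip (lb :: vals.map (· + 1)) (vals ++ [123])) := by
  induction ws with
  | nil =>
    intro vals acc lb h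
    simp only [pvParseInts, Option.some_inj] at h
    simp [← h, pvALoop, List.zip]
  | cons w ws ih =>
    intro vals acc lb h
    simp only [pvParseInts] at h
    cases hu : PySem.Int.ofStr? w with
    | none => simp [hu] at h
    | some u =>
      rw [hu] at h
      cases hvs : pvParseInts ws with
      | none => simp [hvs] at h
      | some vs =>
        rw [hvs] at h
        simp only [Option.map_some, Option.some_inj] at h
        subst h
        simp [pvALoop, hu, ih vs _ (u + 1) hvs, List.zip]

-- ===== VERDICT (by name: the statement is the Claim_ definition above) =====
theorem generate_age_groups_spec : Claim_equal_generate_age_groups := by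
  intro s _ hpre
  unfold Spec_generate_age_groups generate_age_groups generate_age_groups_alt
  obtain ⟨vals, hvals⟩ := pvParseInts_isSome _ hpre
  rw [hvals, pvALoop_eq _ vals [] 0 hvals]
  simp
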